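-- pv_equiv track=rewrite | github.com/dotHTM/bookletMaker | bookletMaker.py | signatureBuilder
-- ===== SOURCE A (Python) =====
-- import math
--
-- def signatureBuilder(sequence, blankValue, startNumber):
--     start = 0
--     length = len(sequence)
--     missingLength = math.ceil(length / 4) * 4 - length
--     turnAroundIndex = math.ceil(length / 4) * 2
--
--     for x in range(0, missingLength):
--         sequence.append(page(blankValue, ''))
--
--     pages = []
--     walk = 0
--     direction = 1
--     for i in sequence:
--         if direction == 1 and walk < turnAroundIndex:
--             walk += 1
--             pages.append([i])
--         else:
--             direction = -1
--             walk += -1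
--             pages[walk].append(i)
--
--     walk = 0
--     for i in pages:
--         walk += 1
--         if walk % 2 == 1:
--             i.reverse()
--
--     printablePages = []
--     for p in pages:
--         for i in p:
--             if i == blankValue:
--                 printablePages.append(blankValue)
--             else:
--                 printablePages.append(i)
--
--     return printablePages
--
-- def page(value, number):
--     return {'page': value, 'number': number}
-- ===== SOURCE B (Python) =====
-- import math
--
-- def signatureBuilder(sequence, blankValue, startNumber):
--     missing = math.ceil(len(sequence) / 4) * 4 - len(sequence)
--     for _ in range(missing):
--         sequence.append(page(blankValue, ''))
--     n = len(sequence)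
--     out = []
--     for k in range(n // 2):
--         a, b = sequence[k], sequence[n - 1 - k]
--         out += [b, a] if k % 2 == 0 else [a, b]
--     return out
--
-- def page(value, number):
--     return {'page': value, 'number': number}
-- ===== Notes on version B (the rewrite author's own statement) =====
-- stated objective: simpler
-- what changed: B replaces A's walk-pointer distribution into a pages list, the in-place odd-page reverse pass and the final flatten by one direct pass that pairs sequence[k] with sequence[n-1-k] on the padded sequence and emits each pair in parity order; Pre_ excludes sequences whose length is not a multiple of 4, where A's returned list contains the padding dict {'page': blankValue, 'number': ''} whose 'page' value is itself a dict, i.e. a value outside the declared return type list[dict[str,str]] that the type convention cannot represent.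
import Mathlib
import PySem

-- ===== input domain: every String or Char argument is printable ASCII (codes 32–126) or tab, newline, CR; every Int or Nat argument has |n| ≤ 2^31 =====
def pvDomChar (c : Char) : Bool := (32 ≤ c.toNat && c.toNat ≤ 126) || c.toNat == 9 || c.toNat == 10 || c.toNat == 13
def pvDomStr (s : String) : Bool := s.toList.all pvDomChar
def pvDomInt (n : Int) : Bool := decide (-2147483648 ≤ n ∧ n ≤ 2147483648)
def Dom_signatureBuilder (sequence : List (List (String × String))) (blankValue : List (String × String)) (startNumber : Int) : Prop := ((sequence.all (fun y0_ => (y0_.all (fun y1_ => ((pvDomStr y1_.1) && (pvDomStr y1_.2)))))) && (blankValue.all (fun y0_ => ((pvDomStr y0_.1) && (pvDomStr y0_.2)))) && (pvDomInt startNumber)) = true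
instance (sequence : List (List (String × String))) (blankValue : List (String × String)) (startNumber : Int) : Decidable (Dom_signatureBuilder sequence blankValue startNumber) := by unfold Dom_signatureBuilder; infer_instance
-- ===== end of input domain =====

-- B replaces A's walk-pointer distribution / reverse pass / flatten by one direct pass pairing
-- items from both ends of the padded sequence (objective: simpler). Both Pythons mutate the
-- caller's `sequence` by appending the same padding pages; the equivalence proved here is about
-- the RETURN value. Python's padding value page(blankValue,'') = {'page': blankValue, 'number': ''}
-- nests a dict inside a value; both ports transcribe it with the same fixed placeholder
-- pvPadPageA / pvPadPageB (each port pads with its own constant, exactly where its Python does).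

-- ===== PORT A =====
-- placeholder standing for the un-typeable Python dict page(blankValue, '')
def pvPadPageA : List (String × String) := [("page", ""), ("number", "")]

-- the distribution loop: `for i in sequence: if direction == 1 and walk < turn: … else: …`.
-- walk stays in [0, turn] on every input (phase 1 takes exactly `turn` elements of the padded
-- sequence of length 2*turn, phase 2 decrements back to 0), so Nat `walk` and List.set/getD
-- indexing are exact for Python's pages[walk].append(i).
def pvBuildPagesA {α : Type} (turn : Nat) : List α → List (List α) → Nat → Int → List (List α)
  | [], pages, _, _ => pages
  | i :: rest, pages, walk, direction =>
    if direction = 1 ∧ walk < turn then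
      pvBuildPagesA turn rest (pages ++ [[i]]) (walk + 1) direction
    else
      pvBuildPagesA turn rest (pages.set (walk - 1) (pages.getD (walk - 1) [] ++ [i])) (walk - 1) (-1)

def signatureBuilder (sequence : List (List (String × String))) (blankValue : List (String × String)) (startNumber : Int) : List (List (String × String)) :=
  let length := sequence.length
  let missingLength := ((length + 3) / 4) * 4 - length      -- math.ceil(length/4)*4 - length, exact for length ≥ 0
  let turnAroundIndex := ((length + 3) / 4) * 2
  let padded := sequence ++ List.replicate missingLength pvPadPageA
  let pages := pvBuildPagesA turnAroundIndex padded [] 0 1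
  -- `walk = 0; for i in pages: walk += 1; if walk % 2 == 1: i.reverse()`
  let pages2 := (pages.foldl (fun (s : List (List (List (String × String))) × Nat) i =>
      (s.1 ++ [if (s.2 + 1) % 2 = 1 then i.reverse else i], s.2 + 1)) ([], 0)).1
  -- `for p in pages: for i in p: printablePages.append(blankValue if i == blankValue else i)`
  pages2.foldl (fun acc p =>
      p.foldl (fun acc2 i => acc2 ++ [if i = blankValue then blankValue else i]) acc) []

-- ===== PORT B =====
def pvPadPageB : List (String × String) := [("page", ""), ("number", "")]

def signatureBuilder_alt (sequence : List (List (String × String))) (blankValue : List (String × String)) (startNumber : Int) : List (List (String × String)) :=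
  let missing := ((sequence.length + 3) / 4) * 4 - sequence.length
  let padded := sequence ++ List.replicate missing pvPadPageB
  let n := padded.length
  (List.range (n / 2)).flatMap (fun k =>
    let a := padded.getD k []
    let b := padded.getD (n - 1 - k) []
    if k % 2 = 0 then [b, a] else [a, b])

-- ===== PRECONDITION & SPEC =====
-- Pre_ excludes exactly the sequences whose length is not a multiple of 4: there the list A
-- returns contains the padding dict {'page': blankValue, 'number': ''}, whose 'page' value is
-- itself a dict — not a value of the declared return type list[dict[str,str]], so it cannot be
-- represented under the type convention (both ports transcribe it with the fixed placeholder).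
def Pre_signatureBuilder (sequence : List (List (String × String))) (blankValue : List (String × String)) (startNumber : Int) : Prop :=
  sequence.length % 4 = 0
instance (sequence : List (List (String × String))) (blankValue : List (String × String)) (startNumber : Int) : Decidable (Pre_signatureBuilder sequence blankValue startNumber) := by unfold Pre_signatureBuilder; infer_instance

def pvWitness_signatureBuilder : (List (List (String × String))) × (List (String × String)) × Int :=
  ([[("a", "1")], [("a", "2")], [("a", "3")], [("a", "4")]], [("p", "q")], 0)

def Spec_signatureBuilder (sequence : List (List (String × String))) (blankValue : List (String × String)) (startNumber : Int) (out : List (List (String × String))) : Prop := out = signatureBuilder_alt sequence blankValue startNumber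
instance (sequence : List (List (String × String))) (blankValue : List (String × String)) (startNumber : Int) (out : List (List (String × String))) : Decidable (Spec_signatureBuilder sequence blankValue startNumber out) := by unfold Spec_signatureBuilder; infer_instance

-- ===== CLAIM (what is proved, stated in full; the proofs are below) =====
def Claim_equal_signatureBuilder : Prop := ∀ (sequence : List (List (String × String))) (blankValue : List (String × String)) (startNumber : Int), Dom_signatureBuilder sequence blankValue startNumber → Pre_signatureBuilder sequence blankValue startNumber → Spec_signatureBuilder sequence blankValue startNumber (signatureBuilder sequence blankValue startNumber)

-- ===== LEMMAS AND PROOFS =====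

-- common normal form: the page pairs flattened with alternating orientation
def pvAltF {α : Type} : List (α × α) → Nat → List α
  | [], _ => []
  | (a, b) :: ps, k => (if k % 2 = 0 then [b, a] else [a, b]) ++ pvAltF ps (k + 1)

-- closed form of A's reverse pass
def pvAltRev {α : Type} : List (List α) → Nat → List (List α)
  | [], _ => []
  | i :: is, c => (if (c + 1) % 2 = 1 then i.reverse else i) :: pvAltRev is (c + 1)

-- phase 1 of A's loop: the first `turn` elements become singleton pages
theorem pvBuildPagesA_phase1 {α : Type} (turn : Nat) (u : List α) :
    ∀ (rest : List α) (pages : List (List α)) (w : Nat), w + u.length ≤ turn →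
      pvBuildPagesA turn (u ++ rest) pages w 1
        = pvBuildPagesA turn rest (pages ++ u.map (fun i => [i])) (w + u.length) 1 := by
  induction u with
  | nil => intro rest pages w _; simp
  | cons x xs ih =>
      intro rest pages w h
      simp only [List.length_cons] at h
      simp only [List.cons_append, pvBuildPagesA]
      rw [if_pos (by constructor <;> first | trivial | omega)]
      rw [ih rest (pages ++ [[x]]) (w + 1) (by omega)]
      simp only [List.map_cons, List.append_assoc, List.singleton_append, List.length_cons]
      congr 1
      omega

-- phase 2: elements appended at decreasing indices pair the back half onto the pages
theorem pvBuildPagesA_phase2 {α : Type} (turn : Nat) (v : List α) :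
    ∀ (pages : List (List α)) (d : Int), v.length ≤ pages.length →
      (d = 1 → turn ≤ v.length) →
      pvBuildPagesA turn v pages v.length d
        = List.zipWith (fun p b => p ++ [b]) (pages.take v.length) v.reverse
            ++ pages.drop v.length := by
  induction v with
  | nil => intro pages d _ _; simp [pvBuildPagesA]
  | cons b v' ih =>
      intro pages d hlen hd
      have hlt : v'.length < pages.length := by simpa using hlen
      simp only [pvBuildPagesA, List.length_cons]
      rw [if_neg (by rintro ⟨h1, h2⟩; have h3 := hd h1; simp only [List.length_cons] at h3; omega)]
      have hidx : v'.length + 1 - 1 = v'.length := by omega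
      rw [hidx]
      rw [ih (pages.set v'.length (pages.getD v'.length [] ++ [b])) (-1)
            (by simp [hlt.le]) (by intro h; cases h)]
      have hget : pages.getD v'.length [] = pages[v'.length]'hlt :=
        List.getD_eq_getElem _ _ hlt
      rw [List.take_set, List.set_eq_of_length_le (by simp)]
      rw [List.drop_set, if_neg (by omega)]
      have hsub : v'.length - v'.length = 0 := by omega
      rw [hsub, List.drop_eq_getElem_cons hlt, List.set_cons_zero]
      rw [List.reverse_cons, List.take_add_one, hget]
      rw [List.getElem?_eq_getElem hlt]
      rw [List.zipWith_append (by simp [hlt.le])]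
      simp

-- both phases combined: the pages list pairs the two halves
theorem pvBuildPagesA_spec {α : Type} (u v : List α) (h : u.length = v.length) :
    pvBuildPagesA u.length (u ++ v) [] 0 1
      = List.zipWith (fun a b => [a, b]) u v.reverse := by
  rw [pvBuildPagesA_phase1 u.length u v [] 0 (by omega)]
  simp only [List.nil_append, Nat.zero_add]
  rw [h]
  rw [pvBuildPagesA_phase2 v.length v (u.map (fun i => [i])) 1 (by simp [h]) (by omega)]
  rw [List.take_of_length_le (by simp [h]), List.drop_of_length_le (by simp [h]),
    List.append_nil, List.zipWith_map_left]
  rfl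

-- closed form of the reverse-pass fold
theorem pvRevLoop_eq {α : Type} (l : List (List α)) :
    ∀ (acc : List (List α)) (c : Nat),
      (l.foldl (fun (s : List (List α) × Nat) i =>
          (s.1 ++ [if (s.2 + 1) % 2 = 1 then i.reverse else i], s.2 + 1)) (acc, c)).1
        = acc ++ pvAltRev l c := by
  induction l with
  | nil => intro acc c; simp [pvAltRev]
  | cons x xs ih => intro acc c; simp [List.foldl_cons, ih, pvAltRev]

-- the final double loop is a flatten: the blank check is the identity
theorem pvFlattenLoop_eq {α : Type} [DecidableEq α] (blank : α) (pages : List (List α)) :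
    ∀ (acc : List α),
      pages.foldl (fun acc p =>
          p.foldl (fun acc2 i => acc2 ++ [if i = blank then blank else i]) acc) acc
        = acc ++ pages.flatten := by
  have inner : ∀ (p : List α) (acc : List α),
      p.foldl (fun acc2 i => acc2 ++ [if i = blank then blank else i]) acc = acc ++ p := by
    intro p
    induction p with
    | nil => intro acc; simp
    | cons i is ihp =>
        intro acc
        simp only [List.foldl_cons, ihp]
        split_ifs with hb <;> simp [hb]
  induction pages with
  | nil => intro acc; simp
  | cons p ps ih =>
      intro acc
      rw [List.foldl_cons, inner p acc, ih (acc ++ p)]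
      simp

-- A's normal form: reverse pass + flatten over the paired pages is pvAltF
theorem pvA_normal {α : Type} (u : List α) :
    ∀ (w : List α) (c : Nat), u.length = w.length →
      (pvAltRev (List.zipWith (fun a b => [a, b]) u w) c).flatten = pvAltF (u.zip w) c := by
  induction u with
  | nil => intro w c _; simp [pvAltRev, pvAltF]
  | cons x u' ih =>
      intro w c h
      cases w with
      | nil => simp at h
      | cons y w' =>
          simp only [List.zipWith_cons_cons, pvAltRev, List.zip_cons_cons, pvAltF,
            List.flatten_cons]
          rw [ih w' (c + 1) (by simpa using h)]
          congr 1
          split_ifs with h1 h2 <;> first | rfl | omega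

-- B's normal form: the index pass over the two halves is pvAltF
theorem pvB_normal {α : Type} (d : α) (u : List α) :
    ∀ (w : List α) (c : Nat), u.length = w.length →
      (List.range u.length).flatMap (fun k =>
          if (c + k) % 2 = 0 then [w.getD k d, u.getD k d] else [u.getD k d, w.getD k d])
        = pvAltF (u.zip w) c := by
  induction u with
  | nil => intro w c _; simp [pvAltF]
  | cons x u' ih =>
      intro w c h
      cases w with
      | nil => simp at h
      | cons y w' =>
          simp only [List.length_cons]
          rw [List.range_succ_eq_map, List.flatMap_cons, List.flatMap_map]
          simp only [List.getD_cons_zero, List.getD_cons_succ]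
          have : ∀ k, (c + (k + 1)) % 2 = ((c + 1) + k) % 2 := by intro k; ring_nf
          simp only [this]
          rw [ih w' (c + 1) (by simpa using h)]
          simp only [List.zip_cons_cons, pvAltF]
          congr 1

-- core equivalence on any list whose length is a multiple of 4 (instantiated with the
-- padded sequence, whose length is math.ceil(len/4)*4, in the verdict below)
theorem pvCore_eq (s : List (List (String × String))) (blank : List (String × String))
    (hpre : s.length % 4 = 0) :
    ((pvBuildPagesA (s.length / 2) s [] 0 1).foldl
        (fun (st : List (List (List (String × String))) × Nat) i =>
          (st.1 ++ [if (st.2 + 1) % 2 = 1 then i.reverse else i], st.2 + 1)) ([], 0)).1.foldl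
      (fun acc p =>
        p.foldl (fun acc2 i => acc2 ++ [if i = blank then blank else i]) acc) []
    = (List.range (s.length / 2)).flatMap (fun k =>
        if k % 2 = 0 then [s.getD (s.length - 1 - k) [], s.getD k []]
        else [s.getD k [], s.getD (s.length - 1 - k) []]) := by
  set m := s.length / 2 with hm
  have hsplit : s = s.take m ++ s.drop m := (List.take_append_drop m s).symm
  have hlu : (s.take m).length = m := by simp; omega
  have hlv : (s.drop m).length = m := by simp; omega
  have hpages : pvBuildPagesA m s [] 0 1
      = List.zipWith (fun a b => [a, b]) (s.take m) (s.drop m).reverse := by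
    calc pvBuildPagesA m s [] 0 1
        = pvBuildPagesA (s.take m).length (s.take m ++ s.drop m) [] 0 1 := by
          rw [hlu, ← hsplit]
      _ = _ := pvBuildPagesA_spec _ _ (by rw [hlu, hlv])
  rw [hpages, pvRevLoop_eq, List.nil_append, pvFlattenLoop_eq, List.nil_append]
  rw [pvA_normal (s.take m) (s.drop m).reverse 0 (by simp [hlu, hlv])]
  have hB : ∀ k ∈ List.range m,
      (fun k => if k % 2 = 0 then [s.getD (s.length - 1 - k) [], s.getD k []]
                else [s.getD k [], s.getD (s.length - 1 - k) []]) k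
        = (fun k => if (0 + k) % 2 = 0
            then [((s.drop m).reverse).getD k [], (s.take m).getD k []]
            else [(s.take m).getD k [], ((s.drop m).reverse).getD k []]) k := by
    intro k hk
    rw [List.mem_range] at hk
    have h1 : s.getD k [] = (s.take m).getD k [] := by
      rw [List.getD_eq_getElem?_getD, List.getD_eq_getElem?_getD,
        List.getElem?_take_of_lt hk]
    have h2 : s.getD (s.length - 1 - k) [] = ((s.drop m).reverse).getD k [] := by
      have hk2 : k < (s.drop m).reverse.length := by simp [hlv]; omega
      have hkk : s.length - 1 - k < s.length := by omega
      rw [List.getD_eq_getElem?_getD, List.getD_eq_getElem?_getD,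
        List.getElem?_eq_getElem hk2, List.getElem?_eq_getElem hkk]
      simp only [List.getElem_reverse, List.getElem_drop, Option.getD_some]
      congr 1
      simp only [hlv]
      omega
    simp only [Nat.zero_add, h1, h2]
  rw [List.flatMap_congr hB]
  have hBn := pvB_normal ([] : List (String × String)) (s.take m) (s.drop m).reverse 0
    (by simp [hlu, hlv])
  rw [hlu] at hBn
  exact hBn.symm

-- ===== VERDICT (by name: the statement is the Claim_ definition above) =====
theorem signatureBuilder_spec : Claim_equal_signatureBuilder := by
  intro s blank start _ hpre
  unfold Pre_signatureBuilder at hpre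
  unfold Spec_signatureBuilder signatureBuilder signatureBuilder_alt
  dsimp only
  -- on Pre_ (length a multiple of 4) no padding is appended and both ports work on s itself
  have hmiss : ((s.length + 3) / 4) * 4 - s.length = 0 := by omega
  have hturn : ((s.length + 3) / 4) * 2 = s.length / 2 := by omega
  simp only [hmiss, List.replicate_zero, List.append_nil, hturn]
  exact pvCore_eq s blank hpre
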